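-- pv_equiv track=rewrite | github.com/HaymayndzUltra/voice-assistant-prod | scripts/deploy_system_wide_optimization.py | _inject_lazy_loading_method
-- ===== SOURCE A (Python) =====
-- from typing import Dict, List, Any, Tuple
--
-- def _inject_lazy_loading_method(lines: List[str], class_name: str, imports: List[str]) -> List[str]:
--     """Inject lazy loading method into class"""
--     final_lines = []
--     method_injected = False
--
--     for i, line in enumerate(lines):
--         final_lines.append(line)
--
--         # Look for first method in class to inject lazy loading
--         if (not method_injected and
--             line.strip().startswith(f'class {class_name}') and
--             i + 1 < len(lines)):
--
--             # Find next method or end of class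
--             for j in range(i + 1, len(lines)):
--                 if lines[j].strip().startswith('def '):
--                     # Insert lazy loading method before first method
--                     indent = "    "
--                     lazy_method = [
--                         "",
--                         f"{indent}def _lazy_import_dependencies(self):",
--                         f"{indent}    \"\"\"Lazy import heavy dependencies only when needed\"\"\"",
--                         f"{indent}    if not hasattr(self, '_dependencies_loaded'):",
--                         f"{indent}        try:"
--                     ]
--
--                     for imp in imports:
--                         lazy_method.append(f"{indent}            {imp}")
--
--                     lazy_method.extend([
--                         f"{indent}            self._dependencies_loaded = True",
--                         f"{indent}            if hasattr(self, 'logger'):",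
--                         f"{indent}                self.logger.info(f'{{self.name}}: Dependencies loaded successfully')",
--                         f"{indent}        except ImportError as e:",
--                         f"{indent}            self._dependencies_loaded = False",
--                         f"{indent}            if hasattr(self, 'logger'):",
--                         f"{indent}                self.logger.error(f'{{self.name}}: Failed to load dependencies: {{e}}')",
--                         f"{indent}    return self._dependencies_loaded",
--                         ""
--                     ])
--
--                     # Insert before current line
--                     final_lines.extend(lazy_method)
--                     method_injected = True
--                     break
--
--     return final_lines
-- ===== SOURCE B (Python) =====
-- from typing import List
--
--
-- def _lazy_block(imports: List[str]) -> List[str]: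
--     indent = "    "
--     head = [
--         "",
--         f"{indent}def _lazy_import_dependencies(self):",
--         f"{indent}    \"\"\"Lazy import heavy dependencies only when needed\"\"\"",
--         f"{indent}    if not hasattr(self, '_dependencies_loaded'):",
--         f"{indent}        try:",
--     ]
--     tail = [
--         f"{indent}            self._dependencies_loaded = True",
--         f"{indent}            if hasattr(self, 'logger'):",
--         f"{indent}                self.logger.info(f'{{self.name}}: Dependencies loaded successfully')",
--         f"{indent}        except ImportError as e:",
--         f"{indent}            self._dependencies_loaded = False",
--         f"{indent}            if hasattr(self, 'logger'):",
--         f"{indent}                self.logger.error(f'{{self.name}}: Failed to load dependencies: {{e}}')",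
--         f"{indent}    return self._dependencies_loaded",
--         "",
--     ]
--     return head + [f"{indent}            {imp}" for imp in imports] + tail
--
--
-- def _inject_lazy_loading_method(lines: List[str], class_name: str, imports: List[str]) -> List[str]:
--     """Inject lazy loading method into class.
--
--     Single REVERSE pass: walking from the last line to the first while keeping a
--     running 'a def line lies below' suffix flag, so the insertion point (the first
--     class header that has some later def line) is found in O(n) without any inner
--     rescan; then one slice-and-concatenate splice of the fixed block.
--     """
--     idx = None
--     seen_def = False
--     for i, line in reversed(list(enumerate(lines))):
--         s = line.strip()
--         if seen_def and s.startswith('class ' + class_name):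
--             idx = i
--         if s.startswith('def '):
--             seen_def = True
--     if idx is None:
--         return list(lines)
--     return lines[:idx + 1] + _lazy_block(imports) + lines[idx + 1:]
-- ===== Notes on version B (the rewrite author's own statement) =====
-- stated objective: faster
-- what changed: Replaces A's forward accumulate-line-by-line pass with an injected flag and an inner index rescan for a later 'def ' line by one reverse pass that carries a running 'def line below' suffix flag to locate the insertion index, followed by a single slice-and-concatenate splice of the fixed block.
import Mathlib
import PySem

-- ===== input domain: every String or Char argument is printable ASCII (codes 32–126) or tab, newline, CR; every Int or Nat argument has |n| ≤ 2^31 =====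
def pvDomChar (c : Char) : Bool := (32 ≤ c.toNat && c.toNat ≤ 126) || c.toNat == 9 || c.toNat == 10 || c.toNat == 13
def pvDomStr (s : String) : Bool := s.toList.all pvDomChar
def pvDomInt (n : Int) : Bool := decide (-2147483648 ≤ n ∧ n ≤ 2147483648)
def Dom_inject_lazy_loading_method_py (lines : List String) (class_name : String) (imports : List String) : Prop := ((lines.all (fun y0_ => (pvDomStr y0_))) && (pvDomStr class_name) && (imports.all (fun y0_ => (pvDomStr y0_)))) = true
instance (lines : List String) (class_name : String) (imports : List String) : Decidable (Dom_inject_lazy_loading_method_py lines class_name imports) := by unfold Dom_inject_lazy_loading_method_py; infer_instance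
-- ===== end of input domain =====

-- B replaces A's forward accumulate-with-flag pass (with its embedded index rescan for a later
-- 'def ' line) by ONE reverse pass carrying a running 'def below' suffix flag, then a single
-- slice-and-concatenate splice at the found index: alternative decomposition, no inner rescan.

-- ===== PORT A =====
-- shared string predicates (the same tests both Pythons perform)
def pvClsP (class_name : String) (line : String) : Bool :=
  PySem.Str.startswith (PySem.Str.strip line) ("class " ++ class_name)

def pvDefP (line : String) : Bool :=
  PySem.Str.startswith (PySem.Str.strip line) "def "

-- the fixed lines of the injected method around the imports (identical literals in both Pythons)
def pvLazyHead : List String :=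
  [ "",
    "    def _lazy_import_dependencies(self):",
    "        \"\"\"Lazy import heavy dependencies only when needed\"\"\"",
    "        if not hasattr(self, '_dependencies_loaded'):",
    "            try:" ]

def pvLazyTail : List String :=
  [ "                self._dependencies_loaded = True",
    "                if hasattr(self, 'logger'):",
    "                    self.logger.info(f'{self.name}: Dependencies loaded successfully')",
    "            except ImportError as e:",
    "                self._dependencies_loaded = False",
    "                if hasattr(self, 'logger'):",
    "                    self.logger.error(f'{self.name}: Failed to load dependencies: {e}')",
    "        return self._dependencies_loaded",
    "" ]

-- A builds lazy_method by appending each import in a loop, then extends with the tail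
def pvBlockA (imports : List String) : List String :=
  (imports.foldl (fun acc imp => acc ++ ["                " ++ imp]) pvLazyHead) ++ pvLazyTail

-- A's inner 'for j in range(i+1, len(lines))' scan, breaking at the first 'def ' line
def pvScanDef (lines : List String) : List Int → Bool
  | [] => false
  | j :: rest =>
    if pvDefP (PySem.List.pyGetD lines j "") then true else pvScanDef lines rest

-- A's main loop: accumulator final_lines + method_injected flag over enumerate(lines)
def pvLoopA (lines : List String) (class_name : String) (imports : List String) :
    List (Int × String) → List String → Bool → List String
  | [], acc, _ => acc
  | (i, line) :: rest, acc, inj =>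
    let acc' := acc ++ [line]
    if !inj && pvClsP class_name line && decide (i + 1 < (lines.length : Int)) then
      if pvScanDef lines (PySem.List.pyRange (i + 1) (lines.length : Int) 1) then
        pvLoopA lines class_name imports rest (acc' ++ pvBlockA imports) true
      else
        pvLoopA lines class_name imports rest acc' inj
    else
      pvLoopA lines class_name imports rest acc' inj

def inject_lazy_loading_method_py (lines : List String) (class_name : String) (imports : List String) : List String :=
  pvLoopA lines class_name imports (PySem.List.enumerate lines 0) [] false

-- ===== PORT B =====
-- B builds the block with a comprehension over the imports
def pvBlockB (imports : List String) : List String :=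
  pvLazyHead ++ imports.map (fun imp => "                " ++ imp) ++ pvLazyTail

-- B's reverse pass over reversed(list(enumerate(lines))): state (idx, seen_def);
-- idx is overwritten at every class header that already has a def line below it,
-- so it ends at the first such header in forward order
def pvRevScan (class_name : String) : List (Int × String) → Option Int × Bool → Option Int × Bool
  | [], st => st
  | (i, line) :: rest, (idx, seen) =>
    let s := PySem.Str.strip line
    let idx' := if seen && PySem.Str.startswith s ("class " ++ class_name) then some i else idx
    let seen' := if PySem.Str.startswith s "def " then true else seen
    pvRevScan class_name rest (idx', seen')

def inject_lazy_loading_method_py_alt (lines : List String) (class_name : String) (imports : List String) : List String :=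
  match (pvRevScan class_name ((PySem.List.enumerate lines 0).reverse) (none, false)).1 with
  | none => lines
  | some i =>
      PySem.List.slice lines none (some (i + 1)) ++ pvBlockB imports
        ++ PySem.List.slice lines (some (i + 1)) none

-- ===== PRECONDITION & SPEC =====
def Spec_inject_lazy_loading_method_py (lines : List String) (class_name : String) (imports : List String) (out : List String) : Prop := out = inject_lazy_loading_method_py_alt lines class_name imports
instance (lines : List String) (class_name : String) (imports : List String) (out : List String) : Decidable (Spec_inject_lazy_loading_method_py lines class_name imports out) := by unfold Spec_inject_lazy_loading_method_py; infer_instance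

-- ===== CLAIM =====
def Claim_equal_inject_lazy_loading_method_py : Prop := ∀ (lines : List String) (class_name : String) (imports : List String), Dom_inject_lazy_loading_method_py lines class_name imports → Spec_inject_lazy_loading_method_py lines class_name imports (inject_lazy_loading_method_py lines class_name imports)

-- ===== LEMMAS AND PROOFS =====

-- proof helper: the forward search both programs implicitly compute — the first index k
-- whose line is a class header with some 'def ' line strictly after it
def pvFFind (class_name : String) : List String → ℕ → Option Int
  | [], _ => none
  | x :: r, k => if pvClsP class_name x && r.any pvDefP then some (k : Int) else pvFFind class_name r (k + 1)

-- proof helper: forward find-then-splice form, intermediate between A's loop and B's reverse scan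
def pvGoB (lines : List String) (class_name : String) (imports : List String) :
    List (Int × String) → List String
  | [] => lines
  | (i, line) :: rest =>
    if pvClsP class_name line && (PySem.List.slice lines (some (i + 1)) none).any pvDefP then
      PySem.List.slice lines none (some (i + 1)) ++ pvBlockB imports
        ++ PySem.List.slice lines (some (i + 1)) none
    else
      pvGoB lines class_name imports rest

theorem pvBlockA_eq (imports : List String) : pvBlockA imports = pvBlockB imports := by
  unfold pvBlockA pvBlockB
  rw [PySem.List.foldl_append_singleton_eq_map]

theorem pvScanDef_eq (lines : List String) :
    ∀ (l : List String) (k : ℕ), lines.drop k = l →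
      pvScanDef lines (PySem.List.pyRange (k : Int) (lines.length : Int) 1) = l.any pvDefP := by
  intro l
  induction l with
  | nil =>
    intro k hk
    have hlen : lines.length ≤ k := by
      by_contra h
      push_neg at h
      have := List.drop_eq_nil_iff.mp hk
      omega
    rw [PySem.List.pyRange_one_eq_nil (by exact_mod_cast hlen)]
    simp [pvScanDef]
  | cons x r ih =>
    intro k hk
    have hklt : k < lines.length := by
      by_contra h
      push_neg at h
      rw [List.drop_eq_nil_iff.mpr h] at hk
      simp at hk
    have hx : lines.getD k "" = x := by
      have : (lines.drop k).head? = some x := by rw [hk]; rfl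
      rw [List.head?_drop] at this
      simp [List.getD, this]
    have hr : lines.drop (k + 1) = r := by
      have : List.drop 1 (lines.drop k) = r := by rw [hk]; rfl
      rw [List.drop_drop] at this
      exact this
    rw [PySem.List.pyRange_one_cons (by exact_mod_cast hklt)]
    unfold pvScanDef
    rw [PySem.List.pyGetD_natCast, hx]
    by_cases hp : pvDefP x = true
    · simp [hp]
    · simp only [hp, if_neg, Bool.false_eq_true, List.any_cons, Bool.false_or]
      have := ih (k + 1) hr
      push_cast at this ⊢
      exact this

theorem pvLoopA_injected (lines : List String) (class_name : String) (imports : List String) :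
    ∀ (es : List (Int × String)) (acc : List String),
      pvLoopA lines class_name imports es acc true = acc ++ es.map Prod.snd := by
  intro es
  induction es with
  | nil => intro acc; simp [pvLoopA]
  | cons e rest ih =>
    intro acc
    obtain ⟨i, line⟩ := e
    simp [pvLoopA, ih, List.append_assoc]

theorem pvLoop_eq (lines : List String) (class_name : String) (imports : List String) :
    ∀ (l : List String) (k : ℕ) (A0 : List String), lines.drop k = l →
      pvLoopA lines class_name imports (PySem.List.enumerate l (k : Int)) (A0 ++ lines.take k) false
        = A0 ++ pvGoB lines class_name imports (PySem.List.enumerate l (k : Int)) := by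
  intro l
  induction l with
  | nil =>
    intro k A0 hk
    have hlen : lines.length ≤ k := by
      by_contra h
      push_neg at h
      have := List.drop_eq_nil_iff.mp hk
      omega
    rw [PySem.List.enumerate_nil]
    simp [pvLoopA, pvGoB, List.take_of_length_le hlen]
  | cons x r ih =>
    intro k A0 hk
    have hklt : k < lines.length := by
      by_contra h
      push_neg at h
      rw [List.drop_eq_nil_iff.mpr h] at hk
      simp at hk
    have hx : lines[k]? = some x := by
      have : (lines.drop k).head? = some x := by rw [hk]; rfl
      rwa [List.head?_drop] at this
    have hr : lines.drop (k + 1) = r := by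
      have : List.drop 1 (lines.drop k) = r := by rw [hk]; rfl
      rw [List.drop_drop] at this
      exact this
    have htake : lines.take (k + 1) = lines.take k ++ [x] := by
      rw [List.take_succ, hx]; rfl
    have hsliceTo : PySem.List.slice lines none (some ((k : Int) + 1)) = lines.take (k + 1) := by
      have := PySem.List.slice_to_natCast lines (k + 1)
      push_cast at this
      exact this
    have hsliceFrom : PySem.List.slice lines (some ((k : Int) + 1)) none = lines.drop (k + 1) := by
      have := PySem.List.slice_from_natCast lines (k + 1)
      push_cast at this
      exact this
    have hscan : pvScanDef lines (PySem.List.pyRange ((k : Int) + 1) (lines.length : Int) 1)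
        = r.any pvDefP := by
      have := pvScanDef_eq lines r (k + 1) hr
      push_cast at this
      exact this
    rw [PySem.List.enumerate_cons]
    by_cases hc : pvClsP class_name x = true
    · by_cases hs : r.any pvDefP = true
      · -- injection happens here in both versions
        have hlt : (k : Int) + 1 < (lines.length : Int) := by
          rcases List.any_eq_true.mp hs with ⟨y, hy, _⟩
          have : r ≠ [] := by intro h; rw [h] at hy; simp at hy
          have : lines.length ≠ k + 1 := by
            intro h
            apply this
            rw [← hr, List.drop_eq_nil_iff.mpr (by omega)]
          push_cast
          omega
        unfold pvLoopA pvGoB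
        simp only [hc, hs, hscan, hlt, Bool.not_false, Bool.true_and, decide_true,
          Bool.and_true, if_true, hsliceTo, hsliceFrom, hr]
        rw [pvLoopA_injected, PySem.List.map_snd_enumerate, pvBlockA_eq, htake]
        simp [List.append_assoc]
      · -- class header but no later def: both skip this line
        unfold pvLoopA pvGoB
        by_cases hlt : (k : Int) + 1 < (lines.length : Int)
        · simp only [hc, hscan, hs, hlt, hsliceFrom, hr, Bool.not_false, Bool.true_and,
            decide_true, Bool.and_true, if_true, Bool.and_false, if_neg, Bool.false_eq_true,
            not_false_eq_true]
          have := ih (k + 1) A0 hr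
          push_cast at this
          rw [List.append_assoc, ← htake]
          exact this
        · simp only [hc, hs, hlt, hsliceFrom, hr, Bool.not_false, Bool.true_and,
            decide_false, Bool.and_false, if_neg, Bool.false_eq_true, not_false_eq_true,
            Bool.and_true]
          have := ih (k + 1) A0 hr
          push_cast at this
          rw [List.append_assoc, ← htake]
          exact this
    · -- not a class header: both skip
      unfold pvLoopA pvGoB
      simp only [hc, hsliceFrom, hr, Bool.not_false, Bool.true_and, Bool.false_and,
        Bool.and_false, if_neg, Bool.false_eq_true, not_false_eq_true]
      have := ih (k + 1) A0 hr
      push_cast at this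
      rw [List.append_assoc, ← htake]
      exact this

-- pvGoB equals splice-at-pvFFind
theorem pvGoB_eq_ffind (lines : List String) (class_name : String) (imports : List String) :
    ∀ (l : List String) (k : ℕ), lines.drop k = l →
      pvGoB lines class_name imports (PySem.List.enumerate l (k : Int))
        = match pvFFind class_name l k with
          | none => lines
          | some i =>
              PySem.List.slice lines none (some (i + 1)) ++ pvBlockB imports
                ++ PySem.List.slice lines (some (i + 1)) none := by
  intro l
  induction l with
  | nil => intro k _; simp [PySem.List.enumerate_nil, pvGoB, pvFFind]
  | cons x r ih =>
    intro k hk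
    have hr : lines.drop (k + 1) = r := by
      have : List.drop 1 (lines.drop k) = r := by rw [hk]; rfl
      rw [List.drop_drop] at this
      exact this
    have hsliceFrom : PySem.List.slice lines (some ((k : Int) + 1)) none = r := by
      have := PySem.List.slice_from_natCast lines (k + 1)
      push_cast at this
      rw [this, hr]
    rw [PySem.List.enumerate_cons]
    unfold pvGoB pvFFind
    rw [hsliceFrom]
    by_cases hcond : (pvClsP class_name x && r.any pvDefP) = true
    · simp only [hcond, if_true, hsliceFrom]
    · simp only [hcond, Bool.false_eq_true, if_neg, not_false_eq_true]
      have := ih (k + 1) hr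
      push_cast at this
      exact this

theorem pvRevScan_append (class_name : String) (xs ys : List (Int × String)) (st : Option Int × Bool) :
    pvRevScan class_name (xs ++ ys) st = pvRevScan class_name ys (pvRevScan class_name xs st) := by
  induction xs generalizing st with
  | nil => rfl
  | cons e xs ih =>
    obtain ⟨i, line⟩ := e
    obtain ⟨idx, seen⟩ := st
    simp [pvRevScan, ih]

-- B's reverse scan computes (first qualifying index, any-def flag)
theorem pvRevScan_char (class_name : String) :
    ∀ (l : List String) (k : ℕ),
      pvRevScan class_name ((PySem.List.enumerate l (k : Int)).reverse) (none, false)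
        = (pvFFind class_name l k, l.any pvDefP) := by
  intro l
  induction l with
  | nil => intro k; simp [PySem.List.enumerate_nil, pvRevScan, pvFFind]
  | cons x r ih =>
    intro k
    rw [PySem.List.enumerate_cons, List.reverse_cons, pvRevScan_append]
    have hih := ih (k + 1)
    push_cast at hih
    rw [hih]
    show pvRevScan class_name [((k : Int), x)] (pvFFind class_name r (k + 1), r.any pvDefP)
        = (pvFFind class_name (x :: r) k, (x :: r).any pvDefP)
    unfold pvRevScan
    simp only [pvFFind, List.any_cons]
    by_cases hc : pvClsP class_name x = true <;> by_cases hd : pvDefP x = true <;>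
      by_cases hs : r.any pvDefP = true <;>
      simp_all [pvRevScan, pvClsP, pvDefP]

-- ===== VERDICT (by name: the statement is the Claim_ definition above) =====
theorem inject_lazy_loading_method_py_spec : Claim_equal_inject_lazy_loading_method_py := by
  intro lines class_name imports _
  unfold Spec_inject_lazy_loading_method_py inject_lazy_loading_method_py inject_lazy_loading_method_py_alt
  have hA := pvLoop_eq lines class_name imports lines 0 [] (by simp)
  have hG := pvGoB_eq_ffind lines class_name imports lines 0 (by simp)
  have hR := pvRevScan_char class_name lines 0
  simp only [Int.natCast_zero] at hA hG hR
  rw [hR]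
  simpa [hG] using hA
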